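-- pv_equiv track=rewrite | github.com/OpenEPaperLink/Home_Assistant_Integration | custom_components/open_epaper_link/imagegen.py | rounded_corners
-- ===== SOURCE A (Python) =====
-- def rounded_corners(corner_string):
--     if corner_string == "all":
--         return True, True, True, True
--
--     corners = corner_string.split(",")
--     corner_map = {
--         "top_left": 0,
--         "top_right": 1,
--         "bottom_right": 2,
--         "bottom_left": 3
--     }
--     result = [False] * 4
--     for corner in corners:
--         corner = corner.strip()
--         if corner in corner_map:
--             result[corner_map[corner]] = True
--
--     return tuple(result)
-- ===== SOURCE B (Python) =====
-- def rounded_corners(corner_string):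
--     if corner_string == "all":
--         return True, True, True, True
--     tl = tr = br = bl = False
--     token = ""
--     for ch in corner_string:
--         if ch == ",":
--             t = token.strip()
--             tl = tl or t == "top_left"
--             tr = tr or t == "top_right"
--             br = br or t == "bottom_right"
--             bl = bl or t == "bottom_left"
--             token = ""
--         else:
--             token += ch
--     t = token.strip()
--     return (tl or t == "top_left", tr or t == "top_right",
--             br or t == "bottom_right", bl or t == "bottom_left")
-- ===== Notes on version B (the rewrite author's own statement) =====
-- stated objective: alternative
-- what changed: B replaces split-into-a-list plus dict-indexed scatter-writes by a single streaming character-level tokenizer: one pass over the characters maintaining the current token and four boolean accumulators, never calling split or building a name-to-index map.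
import Mathlib
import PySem

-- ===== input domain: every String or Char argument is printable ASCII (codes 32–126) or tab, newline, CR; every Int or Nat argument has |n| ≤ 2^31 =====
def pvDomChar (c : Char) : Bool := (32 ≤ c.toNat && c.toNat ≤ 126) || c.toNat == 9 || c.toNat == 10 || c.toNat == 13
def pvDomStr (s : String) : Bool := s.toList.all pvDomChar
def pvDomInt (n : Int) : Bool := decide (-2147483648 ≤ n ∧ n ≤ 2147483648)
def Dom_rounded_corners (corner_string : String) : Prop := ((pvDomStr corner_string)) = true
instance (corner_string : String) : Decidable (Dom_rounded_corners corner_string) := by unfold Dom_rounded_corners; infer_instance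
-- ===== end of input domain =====

-- B replaces split+dict-scatter by a single streaming character-level pass (tokenizer with
-- four boolean accumulators); alternative decomposition, same cost.

-- ===== PORT A =====
-- A's dict literal `corner_map`
def cornerMapA : PySem.Dict String Int :=
  PySem.Dict.mk [("top_left", 0), ("top_right", 1), ("bottom_right", 2), ("bottom_left", 3)]

-- the body of A's for-loop: strip, look the name up, set the indexed slot
def stepA (res : List Bool) (corner : String) : List Bool :=
  let corner := PySem.Str.strip corner
  if PySem.Dict.contains cornerMapA corner then
    PySem.List.pySetD res (PySem.Dict.getD cornerMapA corner 0) true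
  else res

def rounded_corners (corner_string : String) : Bool × Bool × Bool × Bool :=
  if corner_string = "all" then (true, true, true, true)
  else
    -- split? is total here: the separator "," is non-empty
    let corners := (PySem.Str.split? corner_string ",").getD []
    let result := corners.foldl stepA [false, false, false, false]
    -- tuple(result): result always has length 4
    (result.getD 0 false, result.getD 1 false, result.getD 2 false, result.getD 3 false)

-- ===== PORT B =====
-- closing the current token: strip it and OR each flag with a name comparison
def closeB (f : Bool × Bool × Bool × Bool) (tok : List Char) : Bool × Bool × Bool × Bool :=
  let t := PySem.Chars.strip tok
  (f.1 || decide (t = "top_left".toList), f.2.1 || decide (t = "top_right".toList),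
   f.2.2.1 || decide (t = "bottom_right".toList), f.2.2.2 || decide (t = "bottom_left".toList))

-- one character of B's loop: a comma closes the token, anything else is appended to it
def stepB (st : (Bool × Bool × Bool × Bool) × List Char) (c : Char) :
    (Bool × Bool × Bool × Bool) × List Char :=
  if c = ',' then (closeB st.1 st.2, []) else (st.1, st.2 ++ [c])

def rounded_corners_alt (corner_string : String) : Bool × Bool × Bool × Bool :=
  if corner_string = "all" then (true, true, true, true)
  else
    let st := corner_string.toList.foldl stepB ((false, false, false, false), [])
    closeB st.1 st.2

-- ===== PRECONDITION & SPEC =====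
def Spec_rounded_corners (corner_string : String) (out : Bool × Bool × Bool × Bool) : Prop := out = rounded_corners_alt corner_string
instance (corner_string : String) (out : Bool × Bool × Bool × Bool) : Decidable (Spec_rounded_corners corner_string out) := by unfold Spec_rounded_corners; infer_instance

-- ===== CLAIM (what is proved, stated in full; the proofs are below) =====
def Claim_equal_rounded_corners : Prop := ∀ (corner_string : String), Dom_rounded_corners corner_string → Spec_rounded_corners corner_string (rounded_corners corner_string)

-- ===== LEMMAS AND PROOFS =====

-- reference tokenizer: split a char list at every ','
def splitComma : List Char → List (List Char)
  | [] => [[]]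
  | c :: rest =>
    if c = ',' then [] :: splitComma rest
    else
      match splitComma rest with
      | [] => [[c]]
      | t :: ts => (c :: t) :: ts

theorem splitComma_ne_nil (l : List Char) : splitComma l ≠ [] := by
  cases l with
  | nil => simp [splitComma]
  | cons c rest =>
    simp only [splitComma]
    split_ifs
    · simp
    · cases h : splitComma rest <;> simp

theorem splitComma_no_comma (tok : List Char) (h : ',' ∉ tok) : splitComma tok = [tok] := by
  induction tok with
  | nil => rfl
  | cons c rest ih =>
    have hc : c ≠ ',' := fun hcc => h (hcc ▸ List.mem_cons_self)
    have : splitComma rest = [rest] := ih (fun hm => h (List.mem_cons_of_mem _ hm))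
    simp [splitComma, hc, this]

theorem splitComma_append_comma (tok rest : List Char) (h : ',' ∉ tok) :
    splitComma (tok ++ ',' :: rest) = tok :: splitComma rest := by
  induction tok with
  | nil => simp [splitComma]
  | cons c t ih =>
    have hc : c ≠ ',' := fun hcc => h (hcc ▸ List.mem_cons_self)
    have ht : ',' ∉ t := fun hm => h (List.mem_cons_of_mem _ hm)
    simp [splitComma, hc, ih ht]

-- PySem's splitOn on the one-char separator "," computes splitComma
theorem splitOn_go_comma : ∀ (fuel : Nat) (l cur : List Char) (acc : List (List Char)),
    l.length ≤ fuel →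
    PySem.Chars.splitOn.go [','] fuel l cur acc
      = acc.reverse ++ (match splitComma l with
                        | [] => []
                        | t :: ts => (cur.reverse ++ t) :: ts) := by
  intro fuel
  induction fuel with
  | zero =>
    intro l cur acc hl
    have : l = [] := List.eq_nil_of_length_eq_zero (Nat.le_zero.mp hl)
    subst this
    simp [PySem.Chars.splitOn.go, splitComma]
  | succ f ih =>
    intro l cur acc hl
    cases l with
    | nil => simp [PySem.Chars.splitOn.go, splitComma]
    | cons c rest =>
      by_cases hc : c = ','
      · subst hc
        have hpre : List.isPrefixOf [','] (',' :: rest) = true := by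
          simp [List.isPrefixOf]
        rw [PySem.Chars.splitOn.go]
        simp only [hpre, if_true, List.length_cons] at *
        simp only [List.length_nil, Nat.zero_add, List.drop_succ_cons, List.drop_zero]
        rw [ih rest [] (cur.reverse :: acc) (Nat.succ_le_succ_iff.mp hl)]
        have hne := splitComma_ne_nil rest
        cases hr : splitComma rest with
        | nil => exact absurd hr hne
        | cons t ts => simp [splitComma, hr]
      · have hpre : List.isPrefixOf [','] (c :: rest) = false := by
          simp [List.isPrefixOf]
          exact fun h => absurd h.symm hc
        rw [PySem.Chars.splitOn.go]
        simp only [hpre, Bool.false_eq_true, if_false]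
        rw [ih rest (c :: cur) acc (Nat.succ_le_succ_iff.mp hl)]
        have hne := splitComma_ne_nil rest
        cases hr : splitComma rest with
        | nil => exact absurd hr hne
        | cons t ts => simp [splitComma, hc, hr]

theorem splitOn_comma (l : List Char) : PySem.Chars.splitOn l [','] = splitComma l := by
  rw [PySem.Chars.splitOn, splitOn_go_comma l.length.succ l [] [] (Nat.le_succ _)]
  have hne := splitComma_ne_nil l
  cases hr : splitComma l with
  | nil => exact absurd hr hne
  | cons t ts => simp

-- one step of A's loop on a 4-slot state, by cases on the stripped token
theorem stepA_cases (a b c d : Bool) (x : String) :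
    stepA [a, b, c, d] x =
      if PySem.Str.strip x = "top_left" then [true, b, c, d]
      else if PySem.Str.strip x = "top_right" then [a, true, c, d]
      else if PySem.Str.strip x = "bottom_right" then [a, b, true, d]
      else if PySem.Str.strip x = "bottom_left" then [a, b, c, true]
      else [a, b, c, d] := by
  by_cases h1 : PySem.Str.strip x = "top_left"
  · simp [stepA, cornerMapA, h1, PySem.Dict.contains, PySem.Dict.getD, PySem.Dict.get?,
      PySem.List.pySetD, PySem.List.pySet?, PySem.List.pyIdx?, List.set]
  · by_cases h2 : PySem.Str.strip x = "top_right"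
    · simp [stepA, cornerMapA, h2, PySem.Dict.contains, PySem.Dict.getD, PySem.Dict.get?,
        PySem.List.pySetD, PySem.List.pySet?, PySem.List.pyIdx?, List.set]
    · by_cases h3 : PySem.Str.strip x = "bottom_right"
      · simp [stepA, cornerMapA, h3, PySem.Dict.contains, PySem.Dict.getD, PySem.Dict.get?,
          PySem.List.pySetD, PySem.List.pySet?, PySem.List.pyIdx?, List.set]
      · by_cases h4 : PySem.Str.strip x = "bottom_left"
        · simp [stepA, cornerMapA, h4, PySem.Dict.contains, PySem.Dict.getD, PySem.Dict.get?,
            PySem.List.pySetD, PySem.List.pySet?, PySem.List.pyIdx?, List.set]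
        · simp [stepA, cornerMapA, h1, h2, h3, h4, PySem.Dict.contains, PySem.Dict.get?,
            Ne.symm h1, Ne.symm h2, Ne.symm h3, Ne.symm h4]

-- A's scatter loop, characterised: each slot ends true iff its name occurs among the stripped tokens
theorem foldA_char (cs : List String) (a b c d : Bool) :
    cs.foldl stepA [a, b, c, d]
    = [a || (cs.map PySem.Str.strip).contains "top_left",
       b || (cs.map PySem.Str.strip).contains "top_right",
       c || (cs.map PySem.Str.strip).contains "bottom_right",
       d || (cs.map PySem.Str.strip).contains "bottom_left"] := by
  induction cs generalizing a b c d with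
  | nil => simp
  | cons x xs ih =>
    rw [List.foldl_cons, stepA_cases]
    split_ifs with h1 h2 h3 h4
    · rw [ih]; simp [List.contains_cons, h1]
    · rw [ih]; simp [List.contains_cons, h2]
    · rw [ih]; simp [List.contains_cons, h3]
    · rw [ih]; simp [List.contains_cons, h4]
    · rw [ih]
      simp [List.contains_cons, Ne.symm h1, Ne.symm h2, Ne.symm h3, Ne.symm h4]

-- folding closeB over a token list, characterised the same way (char-list level)
theorem foldClose_char (toks : List (List Char)) (a b c d : Bool) :
    toks.foldl closeB (a, b, c, d)
    = (a || (toks.map PySem.Chars.strip).contains "top_left".toList,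
       b || (toks.map PySem.Chars.strip).contains "top_right".toList,
       c || (toks.map PySem.Chars.strip).contains "bottom_right".toList,
       d || (toks.map PySem.Chars.strip).contains "bottom_left".toList) := by
  induction toks generalizing a b c d with
  | nil => simp
  | cons t ts ih =>
    rw [List.foldl_cons]
    show ts.foldl closeB (closeB (a, b, c, d) t) = _
    rw [closeB, ih]
    simp [Prod.ext_iff, List.contains_cons, Bool.or_assoc, beq_iff_eq, eq_comm]

-- B's character scan equals closing every splitComma token in turn
theorem scanB_char (cs : List Char) (flags : Bool × Bool × Bool × Bool) (tok : List Char)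
    (h : ',' ∉ tok) :
    closeB (cs.foldl stepB (flags, tok)).1 (cs.foldl stepB (flags, tok)).2
      = (splitComma (tok ++ cs)).foldl closeB flags := by
  induction cs generalizing flags tok with
  | nil =>
    simp only [List.foldl_nil, List.append_nil]
    rw [splitComma_no_comma tok h, List.foldl_cons, List.foldl_nil]
  | cons c rest ih =>
    rw [List.foldl_cons, stepB]
    by_cases hc : c = ','
    · subst hc
      rw [if_pos rfl]
      rw [ih (closeB flags tok) [] (by simp)]
      rw [splitComma_append_comma tok rest h, List.foldl_cons]
      simp
    · simp only [if_neg hc]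
      rw [ih flags (tok ++ [c]) (by
        intro hm
        rcases List.mem_append.mp hm with h1 | h1
        · exact h h1
        · exact hc (List.mem_singleton.mp h1).symm)]
      simp

-- string-level vs char-level membership of a corner name among the stripped tokens
theorem contains_strip_bridge (toks : List (List Char)) (name : String) :
    ((toks.map String.ofList).map PySem.Str.strip).contains name
      = (toks.map PySem.Chars.strip).contains name.toList := by
  induction toks with
  | nil => rfl
  | cons t ts ih =>
    simp only [List.map_cons, List.contains_cons, ih]
    congr 1
    have h1 : (PySem.Str.strip (String.ofList t)).toList = PySem.Chars.strip t := by
      simp [PySem.Str.toList_strip]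
    have h2 : (name = PySem.Str.strip (String.ofList t)) ↔ (name.toList = PySem.Chars.strip t) := by
      rw [← h1]
      exact ⟨fun he => he ▸ rfl, fun he => String.toList_injective he⟩
    by_cases hx : name = PySem.Str.strip (String.ofList t)
    · simp [hx, h2.mp hx]
    · have hy : ¬ (name.toList = PySem.Chars.strip t) := fun hy => hx (h2.mpr hy)
      simp [hx, hy]

-- ===== VERDICT (by name: the statement is the Claim_ definition above) =====
theorem rounded_corners_spec : Claim_equal_rounded_corners := by
  intro s _
  unfold Spec_rounded_corners rounded_corners rounded_corners_alt
  by_cases h : s = "all"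
  · simp [h]
  · simp only [h, if_false]
    rw [scanB_char s.toList (false, false, false, false) [] (by simp), List.nil_append]
    rw [foldClose_char]
    have hs : (PySem.Str.split? s ",").getD []
        = (splitComma s.toList).map String.ofList := by
      simp [PySem.Str.split?, PySem.Chars.split?, splitOn_comma]
    rw [hs, foldA_char]
    have hb := fun name => contains_strip_bridge (splitComma s.toList) name
    simp only [List.map_map] at hb
    simp only [Bool.false_or, List.map_map]
    simp only [hb]
    rfl
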